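-- pv_equiv track=rewrite | github.com/manwar/perlweeklychallenge-club | challenge-175/lubos-kolouch/python/ch-2.py | perfect_totient_numbers
-- ===== SOURCE A (Python) =====
-- def totients_up_to(limit: int) -> list[int]:
--     """Compute Euler totient function for 0..limit using a sieve."""
--     phi = list(range(limit + 1))
--     for p in range(2, limit + 1):
--         if phi[p] != p:  # not prime
--             continue
--         for k in range(p, limit + 1, p):
--             phi[k] -= phi[k] // p
--     return phi
--
-- def perfect_totient_numbers(count: int) -> list[int]:
--     """Return first `count` perfect totient numbers."""
--     if count <= 0:
--         raise ValueError("Expected count > 0")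
--
--     # The specification gives the first 20 numbers and the 20th is 5571.
--     limit = 5571
--     phi = totients_up_to(limit)
--
--     out: list[int] = []
--     for n in range(2, limit + 1):
--         total = 0
--         x = n
--         while x > 1:
--             x = phi[x]
--             total += x
--         if total == n:
--             out.append(n)
--             if len(out) == count:
--                 return out
--
--     raise ValueError(f"Unable to find {count} perfect totient numbers up to {limit}")
-- ===== SOURCE B (Python) =====
-- def euler_phi(n: int) -> int:
--     """Euler's totient by trial-division factorization."""
--     result = n
--     m = n
--     p = 2
--     while p * p <= m:
--         if m % p == 0:
--             while m % p == 0: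
--                 m //= p
--             result -= result // p
--         p += 1
--     if m > 1:
--         result -= result // m
--     return result
--
-- def perfect_totient_numbers(count: int) -> list[int]:
--     """Return first `count` perfect totient numbers."""
--     if count <= 0:
--         raise ValueError("Expected count > 0")
--
--     # The specification gives the first 20 numbers and the 20th is 5571.
--     limit = 5571
--
--     out: list[int] = []
--     for n in range(2, limit + 1):
--         total = 0
--         x = n
--         while x > 1:
--             x = euler_phi(x)
--             total += x
--         if total == n:
--             out.append(n)
--             if len(out) == count:
--                 return out
--
--     raise ValueError(f"Unable to find {count} perfect totient numbers up to {limit}")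
-- ===== Notes on version B (the rewrite author's own statement) =====
-- stated objective: alternative
-- what changed: The precomputed totient sieve (totients_up_to, an O(limit log log limit) table of all phi values) is dropped; B computes Euler's totient on demand with a trial-division factorization helper euler_phi, keeping the same guard, limit 5571, chain walk and ValueErrors.
-- outside the precondition, e.g. on perfect_totient_numbers(0): A raises ValueError, B raises ValueError; on perfect_totient_numbers(21): A raises ValueError, B raises ValueError; on perfect_totient_numbers(5571): A raises ValueError, B raises ValueError
import Mathlib
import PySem

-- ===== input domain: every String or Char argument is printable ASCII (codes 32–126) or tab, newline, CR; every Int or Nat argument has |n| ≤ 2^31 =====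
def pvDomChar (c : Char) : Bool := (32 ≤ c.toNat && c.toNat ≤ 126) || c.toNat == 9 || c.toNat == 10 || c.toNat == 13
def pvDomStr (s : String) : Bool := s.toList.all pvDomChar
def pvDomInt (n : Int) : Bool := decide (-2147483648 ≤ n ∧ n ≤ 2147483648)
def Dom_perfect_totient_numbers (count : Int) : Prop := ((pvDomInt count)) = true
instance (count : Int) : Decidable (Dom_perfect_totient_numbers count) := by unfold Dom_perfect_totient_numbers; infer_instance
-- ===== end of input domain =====

-- B replaces A's totient sieve table by an on-demand trial-division euler_phi; no speed claim.

-- ===== PORT A =====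
def totients_up_to (limit : Int) : List Int :=
  let phi := PySem.List.pyRange 0 (limit + 1) 1
  (PySem.List.pyRange 2 (limit + 1) 1).foldl (fun phi p =>
    if PySem.List.pyGetD phi p 0 ≠ p then phi   -- not prime: continue
    else (PySem.List.pyRange p (limit + 1) p).foldl (fun phi k =>
      PySem.List.pySetD phi k
        (PySem.List.pyGetD phi k 0 - PySem.Int.floordiv (PySem.List.pyGetD phi k 0) p)) phi) phi

-- while x > 1: x = phi[x]; total += x  — fuel = starting x; the chain strictly decreases,
-- so the fuel is never exhausted (indices stay in range, so pyGetD is exact here)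
def chainA (phi : List Int) : Nat → Int → Int → Int
  | 0, _, total => total
  | fuel + 1, x, total =>
    if 1 < x then
      let x' := PySem.List.pyGetD phi x 0
      chainA phi fuel x' (total + x')
    else total

def loopA (phi : List Int) (count : Int) : List Int → List Int → List Int
  | [], out => out   -- Python raises ValueError here; such counts are excluded by Pre_
  | n :: rest, out =>
    let total := chainA phi n.toNat n 0
    if total = n then
      let out' := out ++ [n]
      if (out'.length : Int) = count then out' else loopA phi count rest out'
    else loopA phi count rest out

def perfect_totient_numbers (count : Int) : List Int :=
  if count ≤ 0 then []   -- Python raises ValueError("Expected count > 0"); excluded by Pre_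
  else loopA (totients_up_to 5571) count (PySem.List.pyRange 2 (5571 + 1) 1) []

-- ===== PORT B =====
-- inner 'while m % p == 0: m //= p' — fuel bounds the number of divisions
def stripFactor : Nat → Int → Int → Int
  | 0, m, _ => m
  | fuel + 1, m, p =>
    if PySem.Int.mod m p = 0 then stripFactor fuel (PySem.Int.floordiv m p) p else m

-- outer 'while p * p <= m' loop of euler_phi — p increases each step, fuel bounds it
def phiLoop : Nat → Int → Int → Int → Int
  | 0, _, _, result => result
  | fuel + 1, m, p, result =>
    if p * p ≤ m then
      if PySem.Int.mod m p = 0 then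
        phiLoop fuel (stripFactor m.toNat m p) (p + 1) (result - PySem.Int.floordiv result p)
      else phiLoop fuel m (p + 1) result
    else if 1 < m then result - PySem.Int.floordiv result m else result

def euler_phi (n : Int) : Int := phiLoop (n.toNat + 2) n 2 n

-- while x > 1: x = euler_phi(x); total += x — same fuel convention as chainA
def chainB : Nat → Int → Int → Int
  | 0, _, total => total
  | fuel + 1, x, total =>
    if 1 < x then
      let x' := euler_phi x
      chainB fuel x' (total + x')
    else total

def loopB (count : Int) : List Int → List Int → List Int
  | [], out => out   -- Python raises ValueError here; such counts are excluded by Pre_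
  | n :: rest, out =>
    let total := chainB n.toNat n 0
    if total = n then
      let out' := out ++ [n]
      if (out'.length : Int) = count then out' else loopB count rest out'
    else loopB count rest out

def perfect_totient_numbers_alt (count : Int) : List Int :=
  if count ≤ 0 then []   -- Python raises ValueError("Expected count > 0"); excluded by Pre_
  else loopB count (PySem.List.pyRange 2 (5571 + 1) 1) []

-- ===== PRECONDITION & SPEC =====
-- Pre_ excludes exactly the counts on which A raises ValueError: count ≤ 0, and
-- count > 20 (only 20 perfect totient numbers exist up to the hard-coded limit 5571).
def Pre_perfect_totient_numbers (count : Int) : Prop := 1 ≤ count ∧ count ≤ 20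
instance (count : Int) : Decidable (Pre_perfect_totient_numbers count) := by unfold Pre_perfect_totient_numbers; infer_instance
def pvWitness_perfect_totient_numbers : Int := (3)

def Spec_perfect_totient_numbers (count : Int) (out : List Int) : Prop := out = perfect_totient_numbers_alt count
instance (count : Int) (out : List Int) : Decidable (Spec_perfect_totient_numbers count out) := by unfold Spec_perfect_totient_numbers; infer_instance

-- ===== CLAIM (what is proved, stated in full; the proofs are below) =====
def Claim_equal_perfect_totient_numbers : Prop := ∀ (count : Int), Dom_perfect_totient_numbers count → Pre_perfect_totient_numbers count → Spec_perfect_totient_numbers count (perfect_totient_numbers count)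

-- ===== LEMMAS AND PROOFS =====
-- Both the sieve of A and the trial division of B are proved equal to Nat.totient.

-- the "partial totient" after the sieve has processed the outer-loop values 2..P
def pvVal : Nat → Nat → Nat
  | 0, k => k
  | P + 1, k => if (P + 1).Prime ∧ (P + 1) ∣ k then pvVal P k - pvVal P k / (P + 1) else pvVal P k

-- product of the prime factors of k that are ≤ P
def pvG (P k : Nat) : Nat := ∏ q ∈ k.primeFactors.filter (fun q => q ≤ P), q

lemma pvVal_zero_right (P : Nat) : pvVal P 0 = 0 := by
  induction P with
  | zero => rfl
  | succ Q ih => simp [pvVal, ih]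

lemma pvVal_succ_skip (P k : Nat) (h : ¬((P + 1).Prime ∧ (P + 1) ∣ k)) :
    pvVal (P + 1) k = pvVal P k := by simp [pvVal, h]

lemma pvVal_succ_hit (P k : Nat) (hp : (P + 1).Prime) (hd : (P + 1) ∣ k) :
    pvVal (P + 1) k = pvVal P k - pvVal P k / (P + 1) := by simp [pvVal, hp, hd]

lemma pvG_pos (P k : Nat) : 0 < pvG P k := by
  apply Finset.prod_pos
  intro q hq
  exact (Nat.prime_of_mem_primeFactors (Finset.mem_filter.mp hq).1).pos

lemma pvG_not_dvd (P k : Nat) {p : Nat} (hp : p.Prime) (hgt : P < p) : ¬ p ∣ pvG P k := by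
  intro h
  obtain ⟨a, ha, hdvd⟩ := (hp.prime.dvd_finset_prod_iff _).mp h
  have ha' := Finset.mem_filter.mp ha
  have haP : a.Prime := Nat.prime_of_mem_primeFactors ha'.1
  have : p = a := (Nat.prime_dvd_prime_iff_eq hp haP).mp hdvd
  omega

lemma pvG_succ_not (P k : Nat) (h : ¬((P + 1).Prime ∧ (P + 1) ∣ k)) :
    pvG (P + 1) k = pvG P k := by
  unfold pvG
  congr 1
  apply Finset.ext
  intro q
  simp only [Finset.mem_filter]
  constructor
  · rintro ⟨hq, hle⟩
    refine ⟨hq, ?_⟩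
    rcases Nat.lt_or_ge q (P + 1) with h1 | h1
    · omega
    · exfalso
      have : q = P + 1 := by omega
      subst this
      exact h ⟨Nat.prime_of_mem_primeFactors hq, Nat.dvd_of_mem_primeFactors hq⟩
  · rintro ⟨hq, hle⟩; exact ⟨hq, by omega⟩

lemma pvG_succ_hit (P k : Nat) (hk : k ≠ 0) (hp : (P + 1).Prime) (hd : (P + 1) ∣ k) :
    pvG (P + 1) k = (P + 1) * pvG P k := by
  unfold pvG
  have hset : k.primeFactors.filter (fun q => q ≤ P + 1)
      = insert (P + 1) (k.primeFactors.filter (fun q => q ≤ P)) := by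
    apply Finset.ext
    intro q
    simp only [Finset.mem_filter, Finset.mem_insert]
    constructor
    · rintro ⟨hq, hle⟩
      rcases Nat.lt_or_ge q (P + 1) with h1 | h1
      · exact Or.inr ⟨hq, by omega⟩
      · exact Or.inl (by omega)
    · rintro (rfl | ⟨hq, hle⟩)
      · exact ⟨Nat.mem_primeFactors.mpr ⟨hp, hd, hk⟩, le_rfl⟩
      · exact ⟨hq, by omega⟩
  rw [hset, Finset.prod_insert (by simp only [Finset.mem_filter]; omega)]

lemma pvVal_mul_pvG (k : Nat) (hk : k ≠ 0) :
    ∀ P, pvVal P k * pvG P k = k * (pvG P k).totient := by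
  intro P
  induction P with
  | zero =>
    have hempty : k.primeFactors.filter (fun q => q ≤ 0) = ∅ := by
      apply Finset.filter_eq_empty_iff.mpr
      intro q hq
      have := (Nat.prime_of_mem_primeFactors hq).two_le
      omega
    show pvVal 0 k * pvG 0 k = k * (pvG 0 k).totient
    unfold pvG
    rw [hempty]
    simp [pvVal]
  | succ P ih =>
    by_cases h : (P + 1).Prime ∧ (P + 1) ∣ k
    · obtain ⟨hp, hd⟩ := h
      have hnd : ¬ (P + 1) ∣ pvG P k := pvG_not_dvd P k hp (by omega)
      have hcop : Nat.Coprime (P + 1) (pvG P k) := (hp.coprime_iff_not_dvd).mpr hnd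
      -- (P+1) divides pvVal P k
      have hdval : (P + 1) ∣ pvVal P k * pvG P k := by
        rw [ih]; exact dvd_mul_of_dvd_left hd _
      have hdval' : (P + 1) ∣ pvVal P k := hcop.dvd_of_dvd_mul_right hdval
      obtain ⟨w, hw⟩ := hdval'
      have hsub : pvVal P k - pvVal P k / (P + 1) = P * w := by
        rw [hw, Nat.mul_div_cancel_left _ (by omega)]
        have : (P + 1) * w = P * w + w := by ring
        omega
      rw [pvVal_succ_hit P k hp hd, pvG_succ_hit P k hk hp hd, hsub]
      have htot : ((P + 1) * pvG P k).totient = P * (pvG P k).totient := by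
        rw [Nat.totient_mul_of_prime_of_not_dvd hp hnd]
        simp
      rw [htot]
      calc P * w * ((P + 1) * pvG P k) = P * ((P + 1) * w * pvG P k) := by ring
        _ = P * (pvVal P k * pvG P k) := by rw [hw]
        _ = P * (k * (pvG P k).totient) := by rw [ih]
        _ = k * (P * (pvG P k).totient) := by ring
    · rw [pvVal_succ_skip P k h, pvG_succ_not P k h]
      exact ih

lemma tot_prod_primes (s : Finset ℕ) (hs : ∀ q ∈ s, q.Prime) :
    (∏ q ∈ s, q).totient = ∏ q ∈ s, (q - 1) := by
  classical
  induction s using Finset.induction_on with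
  | empty => simp
  | insert a s ha ih =>
    have hap : a.Prime := hs a (Finset.mem_insert_self a s)
    have hnd : ¬ a ∣ ∏ q ∈ s, q := by
      intro h
      obtain ⟨b, hb, hdvd⟩ := (hap.prime.dvd_finset_prod_iff _).mp h
      have hbp : b.Prime := hs b (Finset.mem_insert_of_mem hb)
      have : a = b := (Nat.prime_dvd_prime_iff_eq hap hbp).mp hdvd
      subst this; exact ha hb
    rw [Finset.prod_insert ha, Finset.prod_insert ha,
      Nat.totient_mul_of_prime_of_not_dvd hap hnd,
      ih (fun q hq => hs q (Finset.mem_insert_of_mem hq))]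

lemma pvVal_eq_totient (k P : Nat) (hk : 1 ≤ k) (hP : k ≤ P) : pvVal P k = k.totient := by
  have h := pvVal_mul_pvG k (by omega) P
  have hfull : k.primeFactors.filter (fun q => q ≤ P) = k.primeFactors := by
    apply Finset.filter_true_of_mem
    intro q hq
    exact le_trans (Nat.le_of_dvd (by omega) (Nat.dvd_of_mem_primeFactors hq)) hP
  have hg : pvG P k = ∏ q ∈ k.primeFactors, q := by rw [pvG, hfull]
  have htot : (∏ q ∈ k.primeFactors, q).totient = ∏ q ∈ k.primeFactors, (q - 1) :=
    tot_prod_primes _ (fun q hq => Nat.prime_of_mem_primeFactors hq)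
  have heuler := Nat.totient_mul_prod_primeFactors k
  rw [hg, htot] at h
  have hpos : 0 < ∏ q ∈ k.primeFactors, q := by rw [← hg]; exact pvG_pos P k
  apply Nat.eq_of_mul_eq_mul_right hpos
  rw [h, heuler]

lemma pvVal_prime (p : Nat) (hp : p.Prime) : pvVal (p - 1) p = p := by
  have hempty : p.primeFactors.filter (fun q => q ≤ p - 1) = ∅ := by
    apply Finset.filter_eq_empty_iff.mpr
    intro q hq
    rw [hp.primeFactors, Finset.mem_singleton] at hq
    subst hq
    have := hp.two_le; omega
  have h := pvVal_mul_pvG p (by have := hp.two_le; omega) (p - 1)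
  rw [pvG, hempty] at h
  simpa using h

lemma pvVal_composite (p : Nat) (hp2 : 2 ≤ p) (hnp : ¬ p.Prime) : pvVal (p - 1) p < p := by
  set q := p.minFac with hq
  have hqp : q.Prime := Nat.minFac_prime (by omega)
  have hqd : q ∣ p := Nat.minFac_dvd p
  have hqne : q ≠ p := by
    intro h
    exact hnp ((Nat.prime_def_minFac.mpr ⟨hp2, h⟩))
  have hqle : q ≤ p - 1 := by
    have := Nat.le_of_dvd (by omega) hqd
    omega
  have hqmem : q ∈ p.primeFactors.filter (fun r => r ≤ p - 1) := by
    rw [Finset.mem_filter]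
    exact ⟨Nat.mem_primeFactors.mpr ⟨hqp, hqd, by omega⟩, hqle⟩
  have hgdvd : q ∣ pvG (p - 1) p := Finset.dvd_prod_of_mem _ hqmem
  have hg2 : 2 ≤ pvG (p - 1) p := le_trans hqp.two_le (Nat.le_of_dvd (pvG_pos _ _) hgdvd)
  have h := pvVal_mul_pvG p (by omega) (p - 1)
  have htlt : (pvG (p - 1) p).totient < pvG (p - 1) p := Nat.totient_lt _ (by omega)
  have hlt : pvVal (p - 1) p * pvG (p - 1) p < p * pvG (p - 1) p := by
    rw [h]
    exact Nat.mul_lt_mul_of_pos_left htlt (by omega)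
  exact Nat.lt_of_mul_lt_mul_right hlt

-- ===== list-level sieve lemmas =====

lemma set_map_range (f : Nat → Int) (n j : Nat) (v : Int) (_hj : j < n) :
    ((List.range n).map f).set j v = (List.range n).map (fun i => if i = j then v else f i) := by
  apply List.ext_getElem (by simp)
  intro i hi1 hi2
  simp only [List.getElem_set, List.getElem_map, List.getElem_range]
  rcases eq_or_ne i j with h | h
  · simp [h]
  · simp [h, Ne.symm h]

lemma getD_map_range' (f : Nat → Int) (n : Nat) (k : Int) (h0 : 0 ≤ k) (h1 : k < (n : Int)) :
    PySem.List.pyGetD ((List.range n).map f) k 0 = f k.toNat := by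
  rw [PySem.List.pyGetD_eq_getElem _ _ h0 (by simp; omega)]
  simp

lemma map_range_congr (f g : Nat → Int) (n : Nat) (h : ∀ i, i < n → f i = g i) :
    (List.range n).map f = (List.range n).map g := by
  apply List.map_congr_left
  intro i hi
  exact h i (List.mem_range.mp hi)

lemma fold_set (p : Int) : ∀ (ms : List Int) (h : Nat → Int), ms.Nodup →
    (∀ k ∈ ms, 0 ≤ k ∧ k < 5572) →
    ms.foldl (fun phi k => PySem.List.pySetD phi k
        (PySem.List.pyGetD phi k 0 - PySem.Int.floordiv (PySem.List.pyGetD phi k 0) p))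
      ((List.range 5572).map (fun (i : Nat) => h i)) =
    (List.range 5572).map (fun (i : Nat) =>
      if (i : Int) ∈ ms then h i - PySem.Int.floordiv (h i) p else h i) := by
  intro ms
  induction ms with
  | nil => intro h _ _; simp
  | cons k0 ms ih =>
    intro h hnd hb
    obtain ⟨hk0, hk5⟩ := hb k0 (List.mem_cons_self ..)
    have hget : PySem.List.pyGetD ((List.range 5572).map (fun i => h i)) k0 0 = h k0.toNat :=
      getD_map_range' h 5572 k0 hk0 (by exact_mod_cast hk5)
    have hstep : PySem.List.pySetD ((List.range 5572).map (fun i => h i)) k0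
        (PySem.List.pyGetD ((List.range 5572).map (fun i => h i)) k0 0 -
          PySem.Int.floordiv (PySem.List.pyGetD ((List.range 5572).map (fun i => h i)) k0 0) p)
        = (List.range 5572).map
            (fun i => if i = k0.toNat then h k0.toNat - PySem.Int.floordiv (h k0.toNat) p else h i) := by
      rw [hget, PySem.List.pySetD_of_nonneg _ _ hk0, set_map_range _ _ _ _ (by omega)]
    rw [List.foldl_cons, hstep,
      ih _ (List.nodup_cons.mp hnd).2 (fun k hk => hb k (List.mem_cons_of_mem _ hk))]
    apply map_range_congr
    intro i hi
    by_cases hik : (i : Int) = k0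
    · have hik' : i = k0.toNat := by omega
      have hnotin : (i : Int) ∉ ms := by rw [hik]; exact (List.nodup_cons.mp hnd).1
      subst hik'
      rw [Int.toNat_of_nonneg hk0] at hnotin
      simp [Int.toNat_of_nonneg hk0, hnotin]
    · have hik' : i ≠ k0.toNat := by omega
      by_cases hm : (i : Int) ∈ ms
      · simp [hik', hm, List.mem_cons, hik]
      · simp [hik', hm, List.mem_cons, hik]

-- Int-vs-Nat bridge for the update phi[k] - phi[k] // p
lemma upd_cast (v P : Nat) (_hP : 0 < P) :
    ((v : Int)) - PySem.Int.floordiv (v : Int) (P : Int) = ((v - v / P : Nat) : Int) := by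
  rw [PySem.Int.floordiv_natCast]
  have := Nat.div_le_self v P
  push_cast [this]
  ring

lemma inner_eq (P : Nat) (hp : P.Prime) :
    (PySem.List.pyRange (P : Int) 5572 (P : Int)).foldl
      (fun phi k => PySem.List.pySetD phi k
        (PySem.List.pyGetD phi k 0 - PySem.Int.floordiv (PySem.List.pyGetD phi k 0) (P : Int)))
      ((List.range 5572).map (fun i => (pvVal (P - 1) i : Int)))
    = (List.range 5572).map (fun i => (pvVal P i : Int)) := by
  have hP2 : 2 ≤ P := hp.two_le
  have hPpos : (0 : Int) < (P : Int) := by exact_mod_cast Nat.lt_of_lt_of_le (by norm_num) hP2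
  have hnd : (PySem.List.pyRange (P : Int) 5572 (P : Int)).Nodup := by
    rw [PySem.List.pyRange_of_pos _ _ hPpos]
    apply List.Nodup.map _ (List.nodup_range)
    intro a b hab
    have h1 : (P : Int) * (a : Int) = (P : Int) * (b : Int) := by linarith
    have h2 := mul_left_cancel₀ (by omega : (P : Int) ≠ 0) h1
    exact_mod_cast h2
  have hb : ∀ k ∈ PySem.List.pyRange (P : Int) 5572 (P : Int), 0 ≤ k ∧ k < 5572 := by
    intro k hk
    rw [PySem.List.mem_pyRange_iff_of_pos hPpos] at hk
    omega
  rw [fold_set (P : Int) _ _ hnd hb]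
  apply map_range_congr
  intro i hi
  rcases Nat.eq_zero_or_pos i with rfl | hipos
  · -- index 0 is never touched; both values are 0
    have hmem : ((0 : Nat) : Int) ∉ PySem.List.pyRange (P : Int) 5572 (P : Int) := by
      rw [PySem.List.mem_pyRange_iff_of_pos hPpos]
      push_cast; omega
    rw [if_neg hmem, pvVal_zero_right, pvVal_zero_right]
  · have hmem : ((i : Int) ∈ PySem.List.pyRange (P : Int) 5572 (P : Int)) ↔ P ∣ i := by
      rw [PySem.List.mem_pyRange_iff_of_pos hPpos]
      constructor
      · rintro ⟨h1, h2, h3⟩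
        have h4 : (P : Int) ∣ (i : Int) := by simpa using dvd_add h3 (dvd_refl (P : Int))
        exact_mod_cast h4
      · intro hd
        have hd' : (P : Int) ∣ (i : Int) := by exact_mod_cast hd
        refine ⟨?_, by exact_mod_cast hi, dvd_sub hd' dvd_rfl⟩
        exact_mod_cast Nat.le_of_dvd hipos hd
    by_cases hd : P ∣ i
    · rw [if_pos (hmem.mpr hd)]
      rw [upd_cast _ _ (by omega)]
      obtain ⟨Q, hQ⟩ : ∃ Q, P = Q + 1 := ⟨P - 1, by omega⟩
      subst hQ
      rw [pvVal_succ_hit Q i hp hd]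
      simp
    · rw [if_neg (fun hfalse => hd (hmem.mp hfalse))]
      obtain ⟨Q, hQ⟩ : ∃ Q, P = Q + 1 := ⟨P - 1, by omega⟩
      subst hQ
      rw [pvVal_succ_skip Q i (fun hc => hd hc.2)]
      simp

lemma pvVal_succ_notprime (P k : Nat) (h : ¬ (P + 1).Prime) : pvVal (P + 1) k = pvVal P k := by
  exact pvVal_succ_skip P k (fun hc => h hc.1)

lemma outer_eq : ∀ b : Nat, 2 ≤ b → b ≤ 5572 →
    (PySem.List.pyRange 2 (b : Int) 1).foldl
      (fun phi p =>
        if PySem.List.pyGetD phi p 0 ≠ p then phi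
        else (PySem.List.pyRange p 5572 p).foldl (fun phi k =>
          PySem.List.pySetD phi k
            (PySem.List.pyGetD phi k 0 - PySem.Int.floordiv (PySem.List.pyGetD phi k 0) p)) phi)
      (PySem.List.pyRange 0 5572 1)
    = (List.range 5572).map (fun i => (pvVal (b - 1) i : Int)) := by
  intro b hb2
  induction b, hb2 using Nat.le_induction with
  | base =>
    intro _
    rw [show PySem.List.pyRange 2 ((2 : Nat) : Int) 1 = [] from
      PySem.List.pyRange_one_eq_nil (by norm_num)]
    have h0 : PySem.List.pyRange 0 5572 1 = (List.range 5572).map (fun i => ((i : Nat) : Int)) := by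
      have := PySem.List.pyRange_zero_nat 5572
      simpa using this
    rw [List.foldl_nil, h0]
    apply map_range_congr
    intro i hi
    have : pvVal 1 i = i := by simp [pvVal, Nat.not_prime_one]
    rw [this]
  | succ b hb ih =>
    intro hb5
    have hb' : 2 ≤ b := hb
    have hcast : ((b + 1 : Nat) : Int) = (b : Int) + 1 := by push_cast; ring
    rw [hcast, PySem.List.pyRange_one_succ_right (by exact_mod_cast hb'),
      List.foldl_append, ih (by omega), List.foldl_cons, List.foldl_nil]
    have hblt : (b : Int) < 5572 := by exact_mod_cast (by omega : b < 5572)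
    have hget : PySem.List.pyGetD ((List.range 5572).map (fun i => (pvVal (b - 1) i : Int))) (b : Int) 0
        = (pvVal (b - 1) b : Int) := by
      rw [getD_map_range' _ 5572 (b : Int) (by positivity) hblt]
      simp
    by_cases hp : b.Prime
    · have hval : pvVal (b - 1) b = b := pvVal_prime b hp
      rw [hget, hval]
      rw [if_neg (by simp)]
      have := inner_eq b hp
      rw [this]
      norm_num
    · have hval : pvVal (b - 1) b ≠ b := by
        have := pvVal_composite b hb' hp
        omega
      rw [hget, if_pos (by exact_mod_cast hval)]
      apply map_range_congr
      intro i hi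
      obtain ⟨Q, hQ⟩ : ∃ Q, b = Q + 1 := ⟨b - 1, by omega⟩
      subst hQ
      show ((pvVal Q i : Nat) : Int) = ((pvVal (Q + 1) i : Nat) : Int)
      rw [pvVal_succ_notprime Q i hp]

lemma tot_eq : totients_up_to 5571 = (List.range 5572).map (fun i => (Nat.totient i : Int)) := by
  have h := outer_eq 5572 (by norm_num) le_rfl
  have hnum : ((5572 : Nat) : Int) = (5571 : Int) + 1 := by norm_num
  rw [hnum] at h
  unfold totients_up_to
  rw [show (5571 : Int) + 1 = 5572 from by norm_num] at h ⊢
  rw [h]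
  apply map_range_congr
  intro i hi
  rcases Nat.eq_zero_or_pos i with rfl | hipos
  · rw [pvVal_zero_right]; simp
  · rw [pvVal_eq_totient i 5571 hipos (by omega)]

-- ===== trial-division totient (B) =====

lemma strip_spec : ∀ (fuel : Nat) (m p : Int), 1 ≤ m → 2 ≤ p → m.toNat ≤ fuel →
    ∃ (a : Nat) (m' : Int), stripFactor fuel m p = m' ∧ m = p ^ a * m' ∧ ¬ (p ∣ m') ∧ 1 ≤ m' := by
  intro fuel
  induction fuel with
  | zero => intro m p hm hp hf; omega
  | succ f ih =>
    intro m p hm hp hf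
    by_cases hd : p ∣ m
    · have hmod : PySem.Int.mod m p = 0 := (PySem.Int.mod_eq_zero_iff_dvd m p).mpr hd
      obtain ⟨c, hc⟩ := hd
      have hdiv : PySem.Int.floordiv m p = c := by
        rw [hc]; unfold PySem.Int.floordiv; exact Int.mul_fdiv_cancel_left c (by omega)
      have hc1 : 1 ≤ c := by nlinarith
      have hcm : c ≤ m - 1 := by nlinarith
      obtain ⟨a, m', heq, hfact, hnd, hm'⟩ := ih c p hc1 hp (by omega)
      refine ⟨a + 1, m', ?_, ?_, hnd, hm'⟩
      · rw [show stripFactor (f + 1) m p = stripFactor f (PySem.Int.floordiv m p) p from by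
          simp [stripFactor, hmod], hdiv, heq]
      · rw [hc, hfact]; ring
    · have hmod : PySem.Int.mod m p ≠ 0 := fun h => hd ((PySem.Int.mod_eq_zero_iff_dvd m p).mp h)
      exact ⟨0, m, by simp [stripFactor, hmod], by ring, hd, hm⟩

lemma philoop_spec : ∀ (fuel : Nat) (m p r : Int), 1 ≤ m → 2 ≤ p → 0 ≤ r → m ∣ r →
    (∀ q : Nat, q.Prime → (q : Int) ∣ m → p ≤ (q : Int)) → 1 ≤ fuel → m + 2 - p ≤ (fuel : Int) →
    m * phiLoop fuel m p r = r * (Nat.totient m.toNat : Int) := by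
  intro fuel
  induction fuel with
  | zero => intro m p r _ _ _ _ _ h1 _; omega
  | succ f ih =>
    intro m p r hm hp hr hdvd hq _ hfuel
    by_cases hpp : p * p ≤ m
    · have hsq : (2 : Int) ≤ p * p - p := by nlinarith
      have hf1 : 1 ≤ f := by
        have h4 : (4 : Int) ≤ ((f + 1 : Nat) : Int) := by push_cast at hfuel ⊢; linarith
        omega
      by_cases hd : p ∣ m
      · -- p is the least prime factor of m, hence prime
        have hm2 : 2 ≤ m := by nlinarith
        have hpN : 2 ≤ p.toNat := by omega
        have hminq : (p.toNat.minFac : Int) ∣ m := by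
          have h1 : (p.toNat.minFac : Int) ∣ (p.toNat : Int) := Int.natCast_dvd_natCast.mpr (Nat.minFac_dvd _)
          have h2 : ((p.toNat : Int)) = p := by omega
          rw [h2] at h1
          exact dvd_trans h1 hd
        have hple : p ≤ (p.toNat.minFac : Int) := hq _ (Nat.minFac_prime (by omega)) hminq
        have hpprime : p.toNat.Prime := by
          apply Nat.prime_def_minFac.mpr
          constructor
          · omega
          · have : p.toNat.minFac ≤ p.toNat := Nat.minFac_le (by omega)
            omega
        have hmod : PySem.Int.mod m p = 0 := (PySem.Int.mod_eq_zero_iff_dvd m p).mpr hd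
        obtain ⟨a, m', hstrip, hfact, hndm', hm'1⟩ :=
          strip_spec m.toNat m p (by omega) hp le_rfl
        have hane : a ≠ 0 := by
          rintro rfl
          simp at hfact
          rw [hfact] at hd
          exact hndm' hd
        obtain ⟨b, rfl⟩ : ∃ b, a = b + 1 := ⟨a - 1, by omega⟩
        obtain ⟨c, hc⟩ := hdvd
        have hc0 : 0 ≤ c := by nlinarith
        have hrp : r = p * (p ^ b * m' * c) := by rw [hc, hfact]; ring
        have hdivr : PySem.Int.floordiv r p = p ^ b * m' * c := by
          rw [hrp]; unfold PySem.Int.floordiv; exact Int.mul_fdiv_cancel_left _ (by omega)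
        set w : Int := p ^ b * m' * c with hw
        have hw0 : 0 ≤ w := by positivity
        have hr' : r - PySem.Int.floordiv r p = (p - 1) * w := by rw [hdivr, hrp]; ring
        have hm'lem : 2 * m' ≤ m := by
          have hpb : p ≤ p ^ (b + 1) := le_self_pow₀ (by omega) (by omega)
          nlinarith
        have hihres := ih m' (p + 1) ((p - 1) * w) hm'1 (by omega)
          (mul_nonneg (by omega) hw0)
          ⟨(p - 1) * p ^ b * c, by ring⟩
          (by
            intro q hqp hqd
            have h1 : (q : Int) ∣ m := by rw [hfact]; exact Dvd.dvd.mul_left hqd _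
            have h2 := hq q hqp h1
            have h3 : (q : Int) ≠ p := by
              rintro h4
              rw [h4] at hqd
              exact hndm' hqd
            omega)
          (by omega)
          (by
            have hm'ltm : m' ≤ m - 1 := by linarith [hm'lem, hm'1]
            push_cast at hfuel ⊢
            linarith)
        -- totient of m = p^(b+1) * m'
        have hcastp : ((p.toNat : Int)) = p := by omega
        have hcastm' : ((m'.toNat : Int)) = m' := by omega
        have hmN : m.toNat = p.toNat ^ (b + 1) * m'.toNat := by
          have hZ : m = ((p.toNat ^ (b + 1) * m'.toNat : Nat) : Int) := by
            push_cast [hcastp, hcastm']; exact hfact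
          omega
        have hndN : ¬ p.toNat ∣ m'.toNat := by
          intro hcon
          apply hndm'
          have : (p.toNat : Int) ∣ (m'.toNat : Int) := Int.natCast_dvd_natCast.mpr hcon
          have h2 : ((p.toNat : Int)) = p := by omega
          have h3 : ((m'.toNat : Int)) = m' := by omega
          rwa [h2, h3] at this
        have htotm : m.toNat.totient = p.toNat ^ b * (p.toNat - 1) * m'.toNat.totient := by
          rw [hmN, Nat.totient_mul (Nat.Coprime.pow_left _ ((hpprime.coprime_iff_not_dvd).mpr hndN)),
            Nat.totient_prime_pow hpprime (by omega)]
          simp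
        -- assemble
        have hreduce : phiLoop (f + 1) m p r = phiLoop f m' (p + 1) (r - PySem.Int.floordiv r p) := by
          simp only [phiLoop]
          rw [if_pos hpp, if_pos hmod, hstrip]
        rw [hreduce, hr']
        calc m * phiLoop f m' (p + 1) ((p - 1) * w)
            = p ^ (b + 1) * (m' * phiLoop f m' (p + 1) ((p - 1) * w)) := by rw [hfact]; ring
          _ = p ^ (b + 1) * ((p - 1) * w * (m'.toNat.totient : Int)) := by rw [hihres]
          _ = r * (p ^ b * (p - 1) * (m'.toNat.totient : Int)) := by rw [hrp, hw]; ring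
          _ = r * (m.toNat.totient : Int) := by
              have hsub1 : ((p.toNat - 1 : Nat) : Int) = p - 1 := by omega
              have htotmZ : ((m.toNat.totient : Nat) : Int)
                  = p ^ b * (p - 1) * (m'.toNat.totient : Int) := by
                rw [htotm]; push_cast [hsub1, hcastp]; ring
              rw [htotmZ]
      · have hmod : PySem.Int.mod m p ≠ 0 := fun h => hd ((PySem.Int.mod_eq_zero_iff_dvd m p).mp h)
        have hreduce : phiLoop (f + 1) m p r = phiLoop f m (p + 1) r := by
          simp only [phiLoop]
          rw [if_pos hpp, if_neg hmod]
        rw [hreduce]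
        exact ih m (p + 1) r hm (by omega) hr hdvd
          (by
            intro q hqp hqd
            have h2 := hq q hqp hqd
            have h3 : (q : Int) ≠ p := by
              rintro h4
              rw [← h4] at hd
              exact hd hqd
            omega)
          (by omega) (by push_cast at hfuel ⊢; linarith)
    · -- exit: p * p > m
      rcases lt_or_ge 1 m with hm1 | hm1
      · -- m is prime
        have hmprime : m.toNat.Prime := by
          by_contra hnp
          set q := m.toNat.minFac with hqdef
          have hqp : q.Prime := Nat.minFac_prime (by omega)
          have hsq : q ^ 2 ≤ m.toNat := Nat.minFac_sq_le_self (by omega) hnp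
          have hqdvd : (q : Int) ∣ m := by
            have h1 : (q : Int) ∣ (m.toNat : Int) := Int.natCast_dvd_natCast.mpr (Nat.minFac_dvd _)
            have h2 : ((m.toNat : Int)) = m := by omega
            rwa [h2] at h1
          have hple := hq q hqp hqdvd
          have hq0 : (0 : Int) ≤ (q : Int) := by positivity
          have h1 : p * p ≤ (q : Int) * (q : Int) := by nlinarith
          have h2 : ((q : Int)) ^ 2 ≤ ((m.toNat : Int)) := by exact_mod_cast hsq
          have h3 : ((m.toNat : Int)) = m := by omega
          exact hpp (by nlinarith)
        obtain ⟨c, hc⟩ := hdvd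
        have hdivr : PySem.Int.floordiv r m = c := by
          rw [hc]; unfold PySem.Int.floordiv; exact Int.mul_fdiv_cancel_left _ (by omega)
        have hreduce : phiLoop (f + 1) m p r = r - PySem.Int.floordiv r m := by
          simp only [phiLoop]
          rw [if_neg hpp, if_pos hm1]
        rw [hreduce, hdivr]
        rw [Nat.totient_prime hmprime]
        have : ((m.toNat - 1 : Nat) : Int) = m - 1 := by omega
        rw [this, hc]
        ring
      · -- m = 1
        have hm1' : m = 1 := by omega
        have hreduce : phiLoop (f + 1) m p r = r := by
          simp only [phiLoop]
          rw [if_neg hpp, if_neg (by omega : ¬ (1 : Int) < m)]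
        rw [hreduce, hm1']
        simp [Nat.totient_one]

lemma euler_phi_eq (x : Int) (hx : 1 ≤ x) : euler_phi x = (Nat.totient x.toNat : Int) := by
  have h := philoop_spec (x.toNat + 2) x 2 x hx (by norm_num) (by omega) dvd_rfl
    (fun q hqp _ => by exact_mod_cast hqp.two_le) (by omega) (by push_cast; omega)
  unfold euler_phi
  exact mul_left_cancel₀ (by omega : x ≠ 0) (by rw [h])

-- ===== the two chains and main loops agree =====

lemma phi_key (x : Int) (h2 : 2 ≤ x) (h5 : x ≤ 5571) :
    PySem.List.pyGetD (totients_up_to 5571) x 0 = euler_phi x ∧ 1 ≤ euler_phi x ∧ euler_phi x < x := by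
  have he : euler_phi x = (Nat.totient x.toNat : Int) := euler_phi_eq x (by omega)
  have hget : PySem.List.pyGetD (totients_up_to 5571) x 0 = (Nat.totient x.toNat : Int) := by
    rw [tot_eq, getD_map_range' _ 5572 x (by omega) (by omega)]
  have hpos : 0 < x.toNat.totient := Nat.totient_pos.mpr (by omega)
  have hlt : x.toNat.totient < x.toNat := Nat.totient_lt _ (by omega)
  refine ⟨by rw [hget, he], by rw [he]; exact_mod_cast hpos, by rw [he]; omega⟩

lemma chain_eq : ∀ (fuel : Nat) (x t : Int), 1 ≤ x → x ≤ 5571 →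
    chainA (totients_up_to 5571) fuel x t = chainB fuel x t := by
  intro fuel
  induction fuel with
  | zero => intro x t _ _; rfl
  | succ f ih =>
    intro x t h1 h5
    simp only [chainA, chainB]
    by_cases hx : 1 < x
    · obtain ⟨heq, he1, helt⟩ := phi_key x (by omega) h5
      rw [if_pos hx, if_pos hx, heq]
      exact ih _ _ he1 (by omega)
    · rw [if_neg hx, if_neg hx]

lemma loop_eq : ∀ (l : List Int) (out : List Int) (count : Int),
    (∀ n ∈ l, 2 ≤ n ∧ n ≤ 5571) →
    loopA (totients_up_to 5571) count l out = loopB count l out := by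
  intro l
  induction l with
  | nil => intro out count _; rfl
  | cons n rest ih =>
    intro out count hmem
    obtain ⟨hn2, hn5⟩ := hmem n (List.mem_cons_self ..)
    have hrest : ∀ m ∈ rest, 2 ≤ m ∧ m ≤ 5571 := fun m hm => hmem m (List.mem_cons_of_mem _ hm)
    simp only [loopA, loopB, chain_eq n.toNat n 0 (by omega) hn5]
    by_cases ht : chainB n.toNat n 0 = n
    · rw [if_pos ht, if_pos ht]
      by_cases hl : ((out ++ [n]).length : Int) = count
      · rw [if_pos hl, if_pos hl]
      · rw [if_neg hl, if_neg hl]; exact ih _ _ hrest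
    · rw [if_neg ht, if_neg ht]; exact ih _ _ hrest

-- ===== VERDICT (by name: the statement is the Claim_ definition above) =====
theorem perfect_totient_numbers_spec : Claim_equal_perfect_totient_numbers := by
  intro count _ hpre
  unfold Spec_perfect_totient_numbers perfect_totient_numbers perfect_totient_numbers_alt
  obtain ⟨h1, _⟩ := hpre
  rw [if_neg (by omega), if_neg (by omega)]
  apply loop_eq
  intro n hn
  rw [PySem.List.mem_pyRange_one] at hn
  omega
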